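-- pv_equiv track=rewrite | github.com/ericskim/redax | vpax/utils.py | index_interval
-- ===== SOURCE A (Python) =====
-- def increment_index(index: int, increment: int, nbits=None, graycode=False):
--     if graycode:
--         assert nbits is not None
--         index = graytobin(index)
--         index = (index + increment) % 2**nbits
--         return bintogray(index)
--     else:
--         return index + increment
--
-- def index_interval(lb: int, ub: int, nbits=None, graycode=False):
--     """Construct an integer interval that includes both ends lb and ub."""
--     if graycode:
--         assert nbits is not None
--     else:
--         assert lb <= ub
--
--     window = []
--     i = lb
--     while True:
--         window.append(i)
--         if i == ub:
--             break
--         i = increment_index(i, 1, nbits, graycode)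
--     return window
--
-- def bintogray(x: int):
--     """
--     Convert a binary encoded positive integer into gray code.
--     """
--     assert x >= 0
--     return x ^ (x >> 1)
--
-- def graytobin(x: int):
--     """
--     Convert a gray code encoded positive integer into the standard binary encoding.
--     """
--     assert x >= 0
--     mask = x >> 1
--     while(mask != 0):
--         x = x ^ mask
--         mask = mask >> 1
--     return x
-- ===== SOURCE B (Python) =====
-- def bintogray(x: int):
--     assert x >= 0
--     return x ^ (x >> 1)
--
-- def graytobin(x: int):
--     assert x >= 0
--     mask = x >> 1
--     while mask != 0:
--         x = x ^ mask
--         mask = mask >> 1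
--     return x
--
-- def index_interval(lb: int, ub: int, nbits=None, graycode=False):
--     """Construct an integer interval that includes both ends lb and ub."""
--     if graycode:
--         assert nbits is not None
--         m = 2 ** nbits
--         start = graytobin(lb)
--         count = (graytobin(ub) - start) % m
--         return [bintogray((start + k) % m) for k in range(count + 1)]
--     else:
--         assert lb <= ub
--         return list(range(lb, ub + 1))
-- ===== Notes on version B (the rewrite author's own statement) =====
-- stated objective: alternative
-- what changed: Replaces A's sentinel while-loop that repeatedly gray-increments until it happens to hit ub with a length-first closed form: compute start = graytobin(lb) and count = (graytobin(ub) - start) % 2**nbits once, then map bintogray over a fixed range of binary indices; the non-gray branch becomes list(range(lb, ub+1)).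
-- outside the precondition, e.g. on index_interval(5, 0, 1, True): A returns [5, 1, 0], B returns [0]; on index_interval(5, 5, -1, True): A returns [5], B raises TypeError
import Mathlib
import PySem

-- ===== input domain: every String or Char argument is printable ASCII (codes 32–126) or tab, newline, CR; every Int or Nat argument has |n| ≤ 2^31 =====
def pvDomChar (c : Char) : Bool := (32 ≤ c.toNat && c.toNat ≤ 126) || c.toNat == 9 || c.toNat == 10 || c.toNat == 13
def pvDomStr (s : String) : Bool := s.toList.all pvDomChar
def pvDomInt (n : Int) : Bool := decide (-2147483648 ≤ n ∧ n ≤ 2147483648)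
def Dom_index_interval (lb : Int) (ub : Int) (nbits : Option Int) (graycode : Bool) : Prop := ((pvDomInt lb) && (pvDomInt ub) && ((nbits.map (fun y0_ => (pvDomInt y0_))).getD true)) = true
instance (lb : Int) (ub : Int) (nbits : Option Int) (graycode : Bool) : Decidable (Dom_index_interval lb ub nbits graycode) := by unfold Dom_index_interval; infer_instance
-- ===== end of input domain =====

-- B replaces A's sentinel while-loop (gray-increment until i == ub) by a closed-form element
-- count and a map over a fixed range (resp. list(range(lb, ub+1))); equal return values on Pre_.

-- ===== PORT A =====
-- module helper bintogray(x) = x ^ (x >> 1), Nat core (Python asserts x >= 0; exact there)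
def pvBgN (x : Nat) : Nat := x ^^^ (x >>> 1)

-- module helper graytobin's while-loop over (x, mask); mask >>> 1 = mask / 2 strictly decreases
def pvGbLoop (x mask : Nat) : Nat :=
  if h : mask = 0 then x else pvGbLoop (x ^^^ mask) (mask >>> 1)
termination_by mask
decreasing_by simp only [Nat.shiftRight_one]; exact Nat.div_lt_self (Nat.pos_of_ne_zero h) one_lt_two

-- bintogray / graytobin on Int: exact for 0 ≤ x (Python asserts 0 ≤ x; 0 ≤ x on every call inside Pre_)
def pvBintogray (x : Int) : Int := if 0 ≤ x then (pvBgN x.toNat : Int) else 0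
def pvGraytobin (x : Int) : Int := if 0 ≤ x then (pvGbLoop x.toNat (x.toNat >>> 1) : Int) else 0

-- increment_index; 2**nbits ported as 2 ^ nbits.toNat, exact for 0 ≤ nbits (holds inside Pre_);
-- the none branch is Python's failing assert (outside Pre_)
def pvIncrementIndex (index : Int) (increment : Int) (nbits : Option Int) (graycode : Bool) : Int :=
  if graycode then
    match nbits with
    | some n => pvBintogray (PySem.Int.mod (pvGraytobin index + increment) ((2 : Int) ^ n.toNat))
    | none => 0
  else index + increment

-- A's 'while True' loop; fuel is a totality guard only: it equals the number of increments the
-- loop performs inside Pre_, so the fuel-0 fallback is reached exactly when i = ub there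
def pvIILoop (fuel : Nat) (i : Int) (ub : Int) (nbits : Option Int) (graycode : Bool)
    (window : List Int) : List Int :=
  match fuel with
  | 0 => window ++ [i]
  | Nat.succ f =>
    let w := window ++ [i]
    if i = ub then w else pvIILoop f (pvIncrementIndex i 1 nbits graycode) ub nbits graycode w

def index_interval (lb : Int) (ub : Int) (nbits : Option Int) (graycode : Bool) : List Int :=
  if graycode then
    match nbits with
    | none => []  -- failing assert in Python (outside Pre_)
    | some n =>
      pvIILoop (PySem.Int.mod (pvGraytobin ub - pvGraytobin lb) ((2 : Int) ^ n.toNat)).toNat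
        lb ub nbits graycode []
  else
    if lb ≤ ub then pvIILoop (ub - lb).toNat lb ub nbits graycode []
    else []  -- failing assert in Python (outside Pre_)

-- ===== PORT B =====
def index_interval_alt (lb : Int) (ub : Int) (nbits : Option Int) (graycode : Bool) : List Int :=
  if graycode then
    match nbits with
    | none => []  -- failing assert (outside Pre_)
    | some n =>
      let m : Int := (2 : Int) ^ n.toNat
      let start := pvGraytobin lb
      let count := PySem.Int.mod (pvGraytobin ub - start) m
      (PySem.List.pyRange 0 (count + 1) 1).map (fun k => pvBintogray (PySem.Int.mod (start + k) m))
  else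
    if lb ≤ ub then PySem.List.pyRange lb (ub + 1) 1
    else []  -- failing assert (outside Pre_)

-- ===== PRECONDITION & SPEC =====
-- Pre_ excludes graycode inputs with nbits = None or negative nbits or a bound outside
-- [0, 2**nbits): there A loops forever or raises, except that when lb == ub (and, start-to-ub,
-- when only lb is out of range) the sentinel loop happens to return before the out-of-range
-- value is ever reduced mod 2**nbits — accidents of the sentinel loop, not intended values.
def Pre_index_interval (lb : Int) (ub : Int) (nbits : Option Int) (graycode : Bool) : Prop :=
  if graycode then
    nbits ≠ none ∧ 0 ≤ nbits.getD 0 ∧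
    0 ≤ lb ∧ lb < (2 : Int) ^ (nbits.getD 0).toNat ∧
    0 ≤ ub ∧ ub < (2 : Int) ^ (nbits.getD 0).toNat
  else lb ≤ ub
instance (lb : Int) (ub : Int) (nbits : Option Int) (graycode : Bool) : Decidable (Pre_index_interval lb ub nbits graycode) := by
  unfold Pre_index_interval; infer_instance

def pvWitness_index_interval : Int × Int × Option Int × Bool := (0, 3, some 2, true)

def Spec_index_interval (lb : Int) (ub : Int) (nbits : Option Int) (graycode : Bool) (out : List Int) : Prop := out = index_interval_alt lb ub nbits graycode
instance (lb : Int) (ub : Int) (nbits : Option Int) (graycode : Bool) (out : List Int) : Decidable (Spec_index_interval lb ub nbits graycode out) := by unfold Spec_index_interval; infer_instance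

-- ===== CLAIM (what is proved, stated in full; the proofs are below) =====
def Claim_equal_index_interval : Prop := ∀ (lb : Int) (ub : Int) (nbits : Option Int) (graycode : Bool), Dom_index_interval lb ub nbits graycode → Pre_index_interval lb ub nbits graycode → Spec_index_interval lb ub nbits graycode (index_interval lb ub nbits graycode)

-- ===== LEMMAS AND PROOFS =====

def pvTAux (y : Nat) : Nat :=
  if h : y = 0 then 0 else y ^^^ pvTAux (y >>> 1)
termination_by y
decreasing_by simp only [Nat.shiftRight_one]; exact Nat.div_lt_self (Nat.pos_of_ne_zero h) one_lt_two

lemma pvShiftRight_xor (a b k : Nat) : (a ^^^ b) >>> k = (a >>> k) ^^^ (b >>> k) := by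
  apply Nat.eq_of_testBit_eq; intro j; simp [Nat.testBit_shiftRight, Nat.testBit_xor]

lemma pvShiftRight_lt (y : Nat) (h : y ≠ 0) : y >>> 1 < y := by
  simp only [Nat.shiftRight_one]; exact Nat.div_lt_self (Nat.pos_of_ne_zero h) one_lt_two

lemma pvTAux_unfold (y : Nat) : pvTAux y = y ^^^ pvTAux (y >>> 1) := by
  by_cases h : y = 0
  · subst h; simp [pvTAux]
  · rw [pvTAux]; simp [h]

lemma pvGbLoop_eq (mask x : Nat) : pvGbLoop x mask = x ^^^ pvTAux mask := by
  induction mask using Nat.strong_induction_on generalizing x with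
  | _ mask ih =>
    by_cases h : mask = 0
    · subst h; simp [pvGbLoop, pvTAux]
    · rw [pvGbLoop, dif_neg h, ih (mask >>> 1) (pvShiftRight_lt mask h),
        pvTAux_unfold mask, Nat.xor_assoc]

lemma pvTAux_shift (y : Nat) : pvTAux y >>> 1 = pvTAux (y >>> 1) := by
  induction y using Nat.strong_induction_on with
  | _ y ih =>
    by_cases h : y = 0
    · subst h; simp [pvTAux]
    · rw [pvTAux_unfold y, pvShiftRight_xor, ih (y >>> 1) (pvShiftRight_lt y h),
        ← pvTAux_unfold (y >>> 1)]

lemma pvTAux_bg (x : Nat) : pvTAux (x ^^^ (x >>> 1)) = x := by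
  induction x using Nat.strong_induction_on with
  | _ x ih =>
    by_cases h : x = 0
    · subst h; simp [pvTAux]
    · rw [pvTAux_unfold, pvShiftRight_xor, ih (x >>> 1) (pvShiftRight_lt x h),
        Nat.xor_assoc, Nat.xor_self, Nat.xor_zero]

lemma pvGb_bg (x : Nat) : pvGbLoop (pvBgN x) (pvBgN x >>> 1) = x := by
  rw [pvGbLoop_eq, pvBgN, pvShiftRight_xor, pvTAux_bg, Nat.xor_assoc, Nat.xor_self, Nat.xor_zero]

lemma pvBg_gb (x : Nat) : pvBgN (pvGbLoop x (x >>> 1)) = x := by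
  rw [pvBgN, pvGbLoop_eq, pvShiftRight_xor, pvTAux_shift, pvTAux_unfold (x >>> 1),
    Nat.xor_assoc, Nat.xor_self, Nat.xor_zero]

lemma pvTAux_lt (y n : Nat) (h : y < 2 ^ n) : pvTAux y < 2 ^ n := by
  induction y using Nat.strong_induction_on with
  | _ y ih =>
    by_cases hy : y = 0
    · subst hy; simpa [pvTAux] using Nat.pos_pow_of_pos n (by decide)
    · rw [pvTAux_unfold]
      exact Nat.xor_lt_two_pow h (ih (y >>> 1) (pvShiftRight_lt y hy)
        (lt_of_le_of_lt (by simpa [Nat.shiftRight_one] using Nat.div_le_self y 2) h))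

lemma pvGbN_lt (x n : Nat) (h : x < 2 ^ n) : pvGbLoop x (x >>> 1) < 2 ^ n := by
  rw [pvGbLoop_eq]
  exact Nat.xor_lt_two_pow h (pvTAux_lt _ _
    (lt_of_le_of_lt (by simpa [Nat.shiftRight_one] using Nat.div_le_self x 2) h))

lemma pvGraytobin_nonneg (a : Int) : 0 ≤ pvGraytobin a := by
  unfold pvGraytobin; split <;> simp

lemma pvGb_bg_int (a : Int) (h : 0 ≤ a) : pvGraytobin (pvBintogray a) = a := by
  unfold pvBintogray pvGraytobin
  rw [if_pos h, if_pos (by positivity), Int.toNat_natCast, pvGb_bg, Int.toNat_of_nonneg h]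

lemma pvBg_gb_int (a : Int) (h : 0 ≤ a) : pvBintogray (pvGraytobin a) = a := by
  unfold pvBintogray pvGraytobin
  rw [if_pos h, if_pos (by positivity), Int.toNat_natCast, pvBg_gb, Int.toNat_of_nonneg h]

lemma pvGraytobin_lt_int (a : Int) (n : Nat) (h0 : 0 ≤ a) (h : a < (2 : Int) ^ n) :
    pvGraytobin a < (2 : Int) ^ n := by
  unfold pvGraytobin
  rw [if_pos h0]
  have hc : ((2 ^ n : Nat) : Int) = (2 : Int) ^ n := by push_cast; ring
  have ha : a.toNat < 2 ^ n := by omega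
  exact_mod_cast pvGbN_lt a.toNat n ha

lemma pvPlainLoop_eq (nbits : Option Int) : ∀ (c : Nat) (lb : Int) (acc : List Int),
    pvIILoop c lb (lb + c) nbits false acc = acc ++ PySem.List.pyRange lb (lb + c + 1) 1 := by
  intro c
  induction c with
  | zero => intro lb acc; simp [pvIILoop, PySem.List.pyRange_one_singleton]
  | succ c ih =>
    intro lb acc
    rw [pvIILoop]
    have hne : ¬ (lb = lb + ((c : Nat) + 1 : Nat)) := by push_cast; omega
    simp only [hne, if_neg, if_false]
    have hinc : pvIncrementIndex lb 1 nbits false = lb + 1 := by simp [pvIncrementIndex]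
    have hub : lb + ((c : Nat) + 1 : Nat) = (lb + 1) + (c : Nat) := by push_cast; ring
    rw [hinc, hub, ih (lb + 1) (acc ++ [lb]),
      PySem.List.pyRange_one_cons (show lb < lb + 1 + (c : Int) + 1 by omega)]
    simp

lemma pvGrayLoop_eq (nn : Int) (ub : Int) (s : Int) :
    ∀ (c : Nat) (k : Int) (acc : List Int), 0 ≤ k →
      k + c = PySem.Int.mod (pvGraytobin ub - s) ((2 : Int) ^ nn.toNat) →
      pvIILoop c (pvBintogray (PySem.Int.mod (s + k) ((2 : Int) ^ nn.toNat))) ub (some nn) true acc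
        = acc ++ (List.range (c + 1)).map
            (fun j : Nat => pvBintogray (PySem.Int.mod (s + (k + (j : Int))) ((2 : Int) ^ nn.toNat))) := by
  intro c
  set m : Int := (2 : Int) ^ nn.toNat with hm
  have hmpos : 0 < m := by positivity
  induction c with
  | zero => intro k acc hk hcnt; simp [pvIILoop]
  | succ c ih =>
    intro k acc hk hcnt
    have hklt : k < PySem.Int.mod (pvGraytobin ub - s) m := by
      have := PySem.Int.mod_nonneg (pvGraytobin ub - s) hmpos
      omega
    have hmlt : PySem.Int.mod (pvGraytobin ub - s) m < m := PySem.Int.mod_lt _ hmpos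
    -- the current element is not yet ub
    have hne : pvBintogray (PySem.Int.mod (s + k) m) ≠ ub := by
      intro heq
      have h1 : pvGraytobin ub = PySem.Int.mod (s + k) m := by
        rw [← heq, pvGb_bg_int _ (PySem.Int.mod_nonneg _ hmpos)]
      have h2 : PySem.Int.mod (pvGraytobin ub - s) m = k := by
        rw [h1]
        simp only [PySem.Int.mod_eq_emod_of_pos hmpos]
        rw [Int.sub_emod, Int.emod_emod_of_dvd _ dvd_rfl, ← Int.sub_emod]
        simp only [add_sub_cancel_left]
        exact Int.emod_eq_of_lt hk (by omega)
      omega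
    rw [pvIILoop]
    simp only [hne, if_neg, if_false]
    have hstep : pvIncrementIndex (pvBintogray (PySem.Int.mod (s + k) m)) 1 (some nn) true
        = pvBintogray (PySem.Int.mod (s + (k + 1)) m) := by
      simp only [pvIncrementIndex, if_true]
      rw [pvGb_bg_int _ (PySem.Int.mod_nonneg _ hmpos), ← hm]
      simp only [PySem.Int.mod_eq_emod_of_pos hmpos]
      rw [Int.emod_add_emod]
      ring_nf
    rw [hstep, ih (k + 1) (acc ++ [pvBintogray (PySem.Int.mod (s + k) m)]) (by omega)
        (by push_cast at hcnt ⊢; omega)]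
    conv_rhs => rw [List.range_succ_eq_map, List.map_cons, List.map_map]
    rw [List.append_assoc, List.singleton_append]
    congr 1
    congr 1
    · norm_num
    · apply List.map_congr_left
      intro j hj
      simp only [Function.comp_apply]
      congr 2
      push_cast
      ring

-- ===== VERDICT (by name: the statement is the Claim_ definition above) =====
theorem index_interval_spec : Claim_equal_index_interval := by
  intro lb ub nbits graycode _hdom hpre
  unfold Spec_index_interval
  cases graycode with
  | false =>
    have hle : lb ≤ ub := by simpa [Pre_index_interval] using hpre
    unfold index_interval index_interval_alt
    simp only [Bool.false_eq_true, if_false, if_pos hle]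
    obtain ⟨c, hc⟩ : ∃ c : Nat, ub = lb + c := ⟨(ub - lb).toNat, by omega⟩
    subst hc
    have h1 : (lb + (c : Int) - lb).toNat = c := by omega
    rw [h1, pvPlainLoop_eq nbits c lb []]
    simp
  | true =>
    unfold Pre_index_interval at hpre
    simp only [if_true] at hpre
    cases nbits with
    | none => exact absurd rfl hpre.1
    | some nn =>
      simp only [Option.getD_some] at hpre
      obtain ⟨-, hn0, hlb0, hlbm, hub0, hubm⟩ := hpre
      unfold index_interval index_interval_alt
      simp only [if_true]
      have hmpos : 0 < (2 : Int) ^ nn.toNat := by positivity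
      have hcnt0 : 0 ≤ PySem.Int.mod (pvGraytobin ub - pvGraytobin lb) ((2 : Int) ^ nn.toNat) :=
        PySem.Int.mod_nonneg _ hmpos
      have hs0 := pvGraytobin_nonneg lb
      have hsm := pvGraytobin_lt_int lb nn.toNat hlb0 hlbm
      have hlb : lb = pvBintogray (PySem.Int.mod (pvGraytobin lb + 0) ((2 : Int) ^ nn.toNat)) := by
        rw [add_zero, PySem.Int.mod_eq_emod_of_pos hmpos, Int.emod_eq_of_lt hs0 hsm,
          pvBg_gb_int lb hlb0]
      have hA := pvGrayLoop_eq nn ub (pvGraytobin lb)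
        (PySem.Int.mod (pvGraytobin ub - pvGraytobin lb) ((2 : Int) ^ nn.toNat)).toNat 0 []
        le_rfl (by rw [zero_add, Int.toNat_of_nonneg hcnt0])
      rw [← hlb] at hA
      rw [hA, List.nil_append, PySem.List.pyRange_one, List.map_map]
      have h2 : (PySem.Int.mod (pvGraytobin ub - pvGraytobin lb) ((2 : Int) ^ nn.toNat) + 1 - 0).toNat
          = (PySem.Int.mod (pvGraytobin ub - pvGraytobin lb) ((2 : Int) ^ nn.toNat)).toNat + 1 := by
        omega
      rw [h2]
      apply List.map_congr_left
      intro j hj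
      simp only [Function.comp_apply, zero_add]
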